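-- pv_equiv track=rewrite | github.com/nnkennard/mention_bottleneck | convert/conll_converter.py | split_parse_label
-- ===== SOURCE A (Python) =====
-- def split_parse_label(label):
--   curr_chunk = ""
--   chunks = []
--   for c in label:
--     if c in "()": # A chunk is everything up to a paren
--       if curr_chunk:
--         chunks.append(curr_chunk)
--       curr_chunk = c
--     else:
--       curr_chunk += c
--   chunks.append(curr_chunk)
--   return chunks
-- ===== SOURCE B (Python) =====
-- def split_parse_label(label):
--   bounds = [i for i, c in enumerate(label) if c in "()"]
--   pieces = [label[a:b] for a, b in zip([0] + bounds, bounds + [len(label)])]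
--   if pieces[0] == "" and len(pieces) > 1:
--     return pieces[1:]
--   return pieces
-- ===== Notes on version B (the rewrite author's own statement) =====
-- stated objective: idiomatic
-- what changed: Replaces the char-by-char accumulator loop with a boundary-index pass: collect paren positions via an enumerate comprehension, slice the label between consecutive boundaries with zip, and drop an empty leading slice.
import Mathlib
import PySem

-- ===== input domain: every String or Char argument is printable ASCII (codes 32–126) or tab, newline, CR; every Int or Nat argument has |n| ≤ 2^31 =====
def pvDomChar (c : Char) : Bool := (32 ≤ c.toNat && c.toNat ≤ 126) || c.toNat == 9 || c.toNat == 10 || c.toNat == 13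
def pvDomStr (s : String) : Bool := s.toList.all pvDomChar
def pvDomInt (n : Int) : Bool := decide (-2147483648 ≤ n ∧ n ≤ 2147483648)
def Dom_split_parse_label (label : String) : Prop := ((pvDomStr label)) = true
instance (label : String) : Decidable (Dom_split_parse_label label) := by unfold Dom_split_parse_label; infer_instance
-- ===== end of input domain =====

-- B chunks by paren boundary indices and slices instead of A's char-by-char accumulator loop (idiomatic; same cost).

def pvParen (c : Char) : Bool := c = '(' || c = ')'

-- ===== PORT A =====
-- literal port of A: fold over the characters with state (curr_chunk, chunks)
def split_parse_label (label : String) : List String :=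
  let st := label.toList.foldl
    (fun (st : List Char × List (List Char)) c =>
      if pvParen c then
        ([c], if st.1.isEmpty then st.2 else st.2 ++ [st.1])
      else (st.1 ++ [c], st.2))
    ([], [])
  (st.2 ++ [st.1]).map (fun l => String.ofList l)

-- ===== PORT B =====
-- literal port of Source B: bounds comprehension (enumerate + filter), zip of shifted bound
-- lists, slices between consecutive bounds, drop an empty leading piece
def split_parse_label_alt (label : String) : List String :=
  let cs := label.toList
  let bounds := ((PySem.List.enumerate cs 0).filter (fun p => pvParen p.2)).map (·.1)
  let pieces := (((0 : Int) :: bounds).zip (bounds ++ [(cs.length : Int)])).map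
    (fun ab => PySem.List.slice cs (some ab.1) (some ab.2))
  let pieces' := match pieces with
    | [] :: p :: rest => p :: rest
    | other => other
  pieces'.map (fun l => String.ofList l)

-- ===== PRECONDITION & SPEC =====
def Spec_split_parse_label (label : String) (out : List String) : Prop := out = split_parse_label_alt label
instance (label : String) (out : List String) : Decidable (Spec_split_parse_label label out) := by unfold Spec_split_parse_label; infer_instance

-- ===== CLAIM (what is proved, stated in full; the proofs are below) =====
def Claim_equal_split_parse_label : Prop := ∀ (label : String), Dom_split_parse_label label → Spec_split_parse_label label (split_parse_label label)

-- ===== LEMMAS AND PROOFS =====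

-- recursive reference form of the split (used only in the proofs)
def pvGo : List Char → List Char → List (List Char)
  | acc, [] => [acc]
  | acc, c :: cs =>
    if pvParen c then
      if acc.isEmpty then pvGo [c] cs else acc :: pvGo [c] cs
    else pvGo (acc ++ [c]) cs

def pvMapHead (f : List Char → List Char) : List (List Char) → List (List Char)
  | [] => []
  | h :: t => f h :: t

def pvBnds (cs : List Char) : List Int :=
  ((PySem.List.enumerate cs 0).filter (fun p => pvParen p.2)).map (·.1)

def pvPieces (cs : List Char) : List (List Char) :=
  (((0 : Int) :: pvBnds cs).zip (pvBnds cs ++ [(cs.length : Int)])).map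
    (fun ab => PySem.List.slice cs (some ab.1) (some ab.2))

theorem pvEnum_shift (cs : List Char) (s : Int) :
    PySem.List.enumerate cs (s + 1) = (PySem.List.enumerate cs s).map (fun p => (p.1 + 1, p.2)) := by
  induction cs generalizing s with
  | nil => simp [PySem.List.enumerate_nil]
  | cons c cs ih =>
    simp [PySem.List.enumerate_cons, ih (s + 1)]

theorem pvBnds_cons (c : Char) (cs : List Char) :
    pvBnds (c :: cs) =
      if pvParen c then (0 : Int) :: (pvBnds cs).map (· + 1)
      else (pvBnds cs).map (· + 1) := by
  unfold pvBnds
  rw [PySem.List.enumerate_cons, pvEnum_shift cs 0]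
  by_cases h : pvParen c <;>
    simp [h, List.filter_map, List.map_map, Function.comp_def]

theorem pvBnds_nonneg (cs : List Char) : ∀ b ∈ pvBnds cs, 0 ≤ b := by
  intro b hb
  unfold pvBnds at hb
  simp only [List.mem_map, List.mem_filter] at hb
  obtain ⟨p, ⟨hp, _⟩, rfl⟩ := hb
  rw [PySem.List.mem_enumerate_iff] at hp
  obtain ⟨k, hk, rfl⟩ := hp
  simp

theorem pvSlice_shift (c : Char) (cs : List Char) (a b : Int) (ha : 0 ≤ a) (hb : 0 ≤ b) :
    PySem.List.slice (c :: cs) (some (a + 1)) (some (b + 1)) =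
      PySem.List.slice cs (some a) (some b) := by
  rw [PySem.List.slice_toNat _ (by omega) (by omega),
      PySem.List.slice_toNat _ ha hb]
  have h1 : (a + 1).toNat = a.toNat + 1 := by omega
  have h2 : (b + 1).toNat = b.toNat + 1 := by omega
  simp [h1, h2]

theorem pvSlice_head (c : Char) (cs : List Char) (b : Int) (hb : 0 ≤ b) :
    PySem.List.slice (c :: cs) (some 0) (some (b + 1)) =
      c :: PySem.List.slice cs (some 0) (some b) := by
  rw [PySem.List.slice_toNat _ (by omega) (by omega),
      PySem.List.slice_toNat _ le_rfl hb]
  have h2 : (b + 1).toNat = b.toNat + 1 := by omega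
  simp [h2]

theorem pvTail_shift (c : Char) (cs : List Char) (bs : List Int) (a : Int)
    (ha : 0 ≤ a) (hbs : ∀ b ∈ bs, 0 ≤ b) :
    (((a + 1) :: bs.map (· + 1)).zip (bs.map (· + 1) ++ [((cs.length : Int) + 1)])).map
        (fun ab => PySem.List.slice (c :: cs) (some ab.1) (some ab.2)) =
      ((a :: bs).zip (bs ++ [(cs.length : Int)])).map
        (fun ab => PySem.List.slice cs (some ab.1) (some ab.2)) := by
  induction bs generalizing a with
  | nil => simp [pvSlice_shift c cs a (cs.length) ha (by positivity)]
  | cons b bs ih =>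
    have hb : 0 ≤ b := hbs b (by simp)
    simp only [List.map_cons, List.cons_append, List.zip_cons_cons, List.map_cons]
    rw [pvSlice_shift c cs a b ha hb, ih b hb (fun x hx => hbs x (by simp [hx]))]

theorem pvPieces_ne_nil (cs : List Char) : pvPieces cs ≠ [] := by
  unfold pvPieces
  cases h : pvBnds cs <;> simp [h]

theorem pvPieces_cons (c : Char) (cs : List Char) :
    pvPieces (c :: cs) =
      if pvParen c then [] :: pvMapHead (c :: ·) (pvPieces cs)
      else pvMapHead (c :: ·) (pvPieces cs) := by
  unfold pvPieces
  rw [pvBnds_cons]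
  have hlen : ((c :: cs).length : Int) = (cs.length : Int) + 1 := by push_cast [List.length_cons]; ring
  have hbs := pvBnds_nonneg cs
  by_cases h : pvParen c <;> simp only [h, if_true, if_false, Bool.false_eq_true]
  · -- paren case
    cases hb : pvBnds cs with
    | nil =>
      simp only [List.map_nil, List.nil_append, List.cons_append, List.zip_cons_cons,
        List.zip_nil_right, List.map_cons, List.map_nil, hlen, pvMapHead]
      rw [pvSlice_head c cs (cs.length) (by positivity)]
      simp [PySem.List.slice_to]
    | cons b bs =>
      have hb0 : 0 ≤ b := hbs b (by rw [hb]; simp)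
      simp only [List.map_cons, List.cons_append, List.zip_cons_cons, List.map_cons, hlen,
        pvMapHead]
      rw [pvSlice_head c cs b hb0]
      rw [PySem.List.slice_toNat _ le_rfl le_rfl]
      simp only [Int.toNat_zero, List.drop_zero, Nat.sub_zero, List.take_zero]
      have := pvTail_shift c cs bs b hb0 (fun x hx => hbs x (by rw [hb]; simp [hx]))
      rw [this]
  · -- non-paren case
    cases hb : pvBnds cs with
    | nil =>
      simp only [List.map_nil, List.nil_append, List.zip_cons_cons, List.zip_nil_right,
        List.map_cons, List.map_nil, hlen, pvMapHead]
      rw [pvSlice_head c cs (cs.length) (by positivity)]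
    | cons b bs =>
      have hb0 : 0 ≤ b := hbs b (by rw [hb]; simp)
      simp only [List.map_cons, List.cons_append, List.zip_cons_cons, List.map_cons, hlen,
        pvMapHead]
      rw [pvSlice_head c cs b hb0]
      have := pvTail_shift c cs bs b hb0 (fun x hx => hbs x (by rw [hb]; simp [hx]))
      rw [this]

-- go with a nonempty accumulator prepends the accumulator onto the first piece
theorem pvGo_eq_mapHead (cs : List Char) : ∀ acc : List Char, acc ≠ [] →
    pvGo acc cs = pvMapHead (acc ++ ·) (pvPieces cs) := by
  induction cs with
  | nil =>
    intro acc _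
    simp [pvGo, pvPieces, pvBnds, PySem.List.enumerate_nil, pvMapHead,
      PySem.List.slice_toNat _ le_rfl le_rfl]
  | cons c cs ih =>
    intro acc hacc
    rw [pvPieces_cons]
    by_cases h : pvParen c
    · have : acc.isEmpty = false := by simpa [List.isEmpty_iff] using hacc
      simp only [pvGo, h, if_true, this, Bool.false_eq_true, if_false]
      rw [ih [c] (by simp)]
      cases hp : pvPieces cs with
      | nil => exact absurd hp (pvPieces_ne_nil cs)
      | cons p t => simp [pvMapHead]
    · simp only [pvGo, h, Bool.false_eq_true, if_false]
      rw [ih (acc ++ [c]) (by simp)]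
      cases hp : pvPieces cs with
      | nil => exact absurd hp (pvPieces_ne_nil cs)
      | cons p t => simp [pvMapHead]

-- A's fold in terms of the reference recursion
theorem pvFoldl_go (cs : List Char) : ∀ (curr : List Char) (chunks : List (List Char)),
    (let st := cs.foldl
        (fun (st : List Char × List (List Char)) c =>
          if pvParen c then
            ([c], if st.1.isEmpty then st.2 else st.2 ++ [st.1])
          else (st.1 ++ [c], st.2))
        (curr, chunks)
     st.2 ++ [st.1]) = chunks ++ pvGo curr cs := by
  induction cs with
  | nil => intro curr chunks; simp [pvGo]
  | cons c cs ih =>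
    intro curr chunks
    by_cases h : pvParen c
    · by_cases hc : curr.isEmpty
      · have : curr = [] := by simpa [List.isEmpty_iff] using hc
        simp only [List.foldl_cons, h, if_true, this, List.isEmpty_nil]
        rw [show pvGo [] (c :: cs) = pvGo [c] cs from by simp [pvGo, h]]
        exact ih [c] chunks
      · have hne : curr ≠ [] := by simpa [List.isEmpty_iff] using hc
        simp only [List.foldl_cons, h, if_true, if_neg hc]
        rw [ih [c] (chunks ++ [curr])]
        simp [pvGo, h, List.isEmpty_iff, hne]
    · simp only [List.foldl_cons, h, Bool.false_eq_true, if_false]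
      rw [ih (curr ++ [c]) chunks]
      simp [pvGo, h]

-- top level: go with the empty accumulator is B's pieces with an empty leading piece dropped
theorem pvGo_nil_eq (cs : List Char) :
    pvGo [] cs = (match pvPieces cs with
      | [] :: p :: rest => p :: rest
      | pieces => pieces) := by
  cases cs with
  | nil =>
    simp [pvGo, pvPieces, pvBnds, PySem.List.enumerate_nil,
      PySem.List.slice_toNat _ le_rfl le_rfl]
  | cons c cs =>
    rw [pvPieces_cons]
    by_cases h : pvParen c
    · simp only [pvGo, h, if_true, List.isEmpty_nil]
      rw [pvGo_eq_mapHead cs [c] (by simp)]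
      cases hp : pvPieces cs with
      | nil => exact absurd hp (pvPieces_ne_nil cs)
      | cons p t => simp [pvMapHead]
    · simp only [pvGo, h, Bool.false_eq_true, if_false, List.nil_append]
      rw [pvGo_eq_mapHead cs [c] (by simp)]
      cases hp : pvPieces cs with
      | nil => exact absurd hp (pvPieces_ne_nil cs)
      | cons p t => simp [pvMapHead]

-- ===== VERDICT (by name: the statement is the Claim_ definition above) =====
theorem split_parse_label_spec : Claim_equal_split_parse_label := by
  intro label _
  unfold Spec_split_parse_label split_parse_label split_parse_label_alt
  simp only []
  rw [pvFoldl_go label.toList [] []]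
  rw [List.nil_append, pvGo_nil_eq label.toList]
  rfl
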